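-- pv_equiv track=rewrite | github.com/Archymade/password-strength-detector | my_feature_engine.py | get_consecutive_numbers
-- ===== SOURCE A (Python) =====
-- def get_consecutive_numbers(x):
--     ''' Count character repetitions. '''
--
--     ix = -1
--     num_consec = 0
--
--     for s in x:
--         ### Account for possible multiple character occurences
--         if x.count(s) > 1:
--             ix += 1
--
--         else:
--             ix = x.index(s)
--
--         ### Watch out for end of string
--         if ix == len(x) - 1:
--             break
--
--         else:
--             ### Finally, count
--             if s.isnumeric() & x[ix + 1].isnumeric():
--                 num_consec += 1
--
--     return num_consec
-- ===== SOURCE B (Python) =====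
-- def get_consecutive_numbers(x):
--     ''' Count character repetitions. '''
--     return sum(1 for a, b in zip(x, x[1:]) if a.isnumeric() and b.isnumeric())
-- ===== Notes on version B (the rewrite author's own statement) =====
-- stated objective: faster
-- what changed: Replaced A's per-character x.count/x.index bookkeeping (whose ix provably always equals the current position) by a single pass over zip(x, x[1:]) counting adjacent numeric pairs.
import Mathlib
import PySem

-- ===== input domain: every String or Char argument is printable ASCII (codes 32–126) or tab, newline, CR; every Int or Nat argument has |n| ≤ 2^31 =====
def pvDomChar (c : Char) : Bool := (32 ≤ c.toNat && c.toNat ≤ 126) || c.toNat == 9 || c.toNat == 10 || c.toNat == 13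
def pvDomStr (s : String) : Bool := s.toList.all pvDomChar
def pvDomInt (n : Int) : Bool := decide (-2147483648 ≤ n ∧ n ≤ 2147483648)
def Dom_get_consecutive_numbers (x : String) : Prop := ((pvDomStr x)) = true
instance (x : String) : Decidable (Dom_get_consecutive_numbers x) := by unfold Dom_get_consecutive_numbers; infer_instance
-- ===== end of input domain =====

-- B replaces A's O(n^2) per-character count/index bookkeeping by one O(n) pass over adjacent pairs.
-- Python's str.isnumeric is ported as PySem.Chars.isdigit: exact on the ASCII input domain.

-- ===== PORT A =====
-- literal port of A's loop: state (ix, num_consec), 'break' = return num_consec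
def getConsecLoopA (cs : List Char) : List Char → Int → Int → Int
  | [], _ix, num => num
  | s :: rest, ix, num =>
    -- if x.count(s) > 1: ix += 1 else: ix = x.index(s)
    let ix' : Int := if PySem.Chars.count cs [s] > 1 then ix + 1 else PySem.Chars.find cs [s]
    -- if ix == len(x) - 1: break
    if ix' = (cs.length : Int) - 1 then num
    else
      -- if s.isnumeric() & x[ix + 1].isnumeric(): num_consec += 1
      let num' : Int := if PySem.Chars.isdigit s && PySem.Chars.isdigit (PySem.List.pyGetD cs (ix' + 1) ' ')
                        then num + 1 else num
      getConsecLoopA cs rest ix' num'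

def get_consecutive_numbers (x : String) : Int :=
  getConsecLoopA x.toList x.toList (-1) 0

-- ===== PORT B =====
def get_consecutive_numbers_alt (x : String) : Int :=
  ((x.toList.zip x.toList.tail).countP
    (fun p => PySem.Chars.isdigit p.1 && PySem.Chars.isdigit p.2) : Int)

-- ===== PRECONDITION & SPEC =====
def Spec_get_consecutive_numbers (x : String) (out : Int) : Prop := out = get_consecutive_numbers_alt x
instance (x : String) (out : Int) : Decidable (Spec_get_consecutive_numbers x out) := by unfold Spec_get_consecutive_numbers; infer_instance

-- ===== CLAIM (what is proved, stated in full; the proofs are below) =====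
def Claim_equal_get_consecutive_numbers : Prop := ∀ (x : String), Dom_get_consecutive_numbers x → Spec_get_consecutive_numbers x (get_consecutive_numbers x)

-- ===== LEMMAS AND PROOFS =====

-- Chars.count of a single-character needle is List.count
lemma countgo_single (c : Char) :
    ∀ (cs : List Char) (fuel acc : Nat), cs.length ≤ fuel →
      PySem.Chars.count.go [c] fuel cs acc = acc + cs.count c := by
  intro cs
  induction cs with
  | nil => intro fuel acc _; cases fuel <;> simp [PySem.Chars.count.go]
  | cons h t ih =>
    intro fuel acc hf
    cases fuel with
    | zero => simp at hf
    | succ f =>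
      simp only [List.length_cons, Nat.succ_le_succ_iff] at hf
      by_cases hch : c = h
      · subst hch
        simp only [PySem.Chars.count.go, List.isPrefixOf, beq_self_eq_true, Bool.true_and,
          List.isPrefixOf_nil_left, if_pos, List.length_nil, List.length_cons, List.drop_succ_cons,
          List.drop_zero]
        rw [ih f (acc + 1) hf]
        simp [List.count_cons]
        omega
      · have hb : (c == h) = false := by simp [hch]
        simp only [PySem.Chars.count.go, List.isPrefixOf, hb, Bool.false_and,
          Bool.false_ne_true, if_neg]
        rw [ih f acc hf]
        simp [List.count_cons, Ne.symm hch]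

lemma count_single (cs : List Char) (c : Char) :
    PySem.Chars.count cs [c] = cs.count c := by
  simp only [PySem.Chars.count, List.isEmpty_cons, if_neg Bool.false_ne_true]
  simpa using countgo_single c cs cs.length 0 le_rfl

-- Chars.find of a single character present in the list is its first index
lemma findgo_single (c : Char) :
    ∀ (cs : List Char) (k : Nat), c ∈ cs →
      PySem.Chars.find.go [c] cs k = (k : Int) + cs.idxOf c := by
  intro cs
  induction cs with
  | nil => intro k h; simp at h
  | cons h t ih =>
    intro k hm
    by_cases hch : c = h
    · subst hch; simp [PySem.Chars.find.go, List.isPrefixOf, List.idxOf_cons_self]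
    · have hb : (c == h) = false := by simp [hch]
      have hmt : c ∈ t := by cases hm with
        | head => exact absurd rfl hch
        | tail _ h => exact h
      simp only [PySem.Chars.find.go, List.isPrefixOf, hb, Bool.false_and,
        List.isPrefixOf_nil_left, Bool.and_true, Bool.false_ne_true, if_neg]
      rw [ih (k + 1) hmt, List.idxOf_cons_ne _ (by simpa using Ne.symm hch)]
      push_cast; ring

-- if c occurs exactly once, its first index is the index of any occurrence
lemma idxOf_of_count_one (c : Char) :
    ∀ (cs : List Char) (k : Nat) (hk : k < cs.length),
      cs[k] = c → cs.count c = 1 → cs.idxOf c = k := by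
  intro cs
  induction cs with
  | nil => intro k hk; simp at hk
  | cons h t ih =>
    intro k hk hget hcnt
    by_cases hch : h = c
    · subst hch
      have ht0 : t.count h = 0 := by
        rw [List.count_cons_self] at hcnt; omega
      have htm : h ∉ t := by simpa using List.count_eq_zero.mp ht0
      cases k with
      | zero => simp [List.idxOf_cons_self]
      | succ n =>
        exfalso
        apply htm
        have hn : n < t.length := by simpa using hk
        have : t[n] = h := by simpa using hget
        exact this ▸ List.getElem_mem hn
    · cases k with
      | zero => exact absurd (by simpa using hget) (by simpa using hch)
      | succ n =>
        have hn : n < t.length := by simpa using hk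
        have hcnt' : t.count c = 1 := by
          rwa [List.count_cons_of_ne (by simpa using hch)] at hcnt
        rw [List.idxOf_cons_ne _ (by simpa using hch),
            ih n hn (by simpa using hget) hcnt']

-- the key invariant: at the step processing cs[k] with previous ix = k - 1, the new ix is k
lemma ix_step (cs : List Char) (k : Nat) (hk : k < cs.length) :
    (if PySem.Chars.count cs [cs[k]] > 1 then ((k : Int) - 1) + 1
     else PySem.Chars.find cs [cs[k]]) = (k : Int) := by
  by_cases hc : PySem.Chars.count cs [cs[k]] > 1
  · rw [if_pos hc]; ring
  · rw [if_neg hc]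
    rw [count_single] at hc
    have hmem : cs[k] ∈ cs := List.getElem_mem hk
    have h1 : cs.count cs[k] = 1 := by
      have := List.count_pos_iff.mpr hmem
      omega
    have : PySem.Chars.find cs [cs[k]] = (0 : Int) + cs.idxOf cs[k] := by
      simpa [PySem.Chars.find] using findgo_single cs[k] cs 0 hmem
    rw [this, idxOf_of_count_one cs[k] cs k hk rfl h1]
    simp

def pairP : Char × Char → Bool := fun p => PySem.Chars.isdigit p.1 && PySem.Chars.isdigit p.2

-- loop invariant: from position k with ix = k-1, the loop adds the adjacent digit pairs of the suffix
lemma loop_inv (cs : List Char) :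
    ∀ (n k : Nat) (num : Int), cs.length - k ≤ n → k ≤ cs.length →
      getConsecLoopA cs (cs.drop k) ((k : Int) - 1) num
        = num + (((cs.drop k).zip (cs.drop (k + 1))).countP pairP : Int) := by
  intro n
  induction n with
  | zero =>
    intro k num hn hk
    have h1 : cs.drop k = [] := List.drop_eq_nil_of_le (by omega)
    have h2 : cs.drop (k + 1) = [] := List.drop_eq_nil_of_le (by omega)
    rw [h1, h2]
    simp [getConsecLoopA]
  | succ n ih =>
    intro k num hn hk
    rcases Nat.lt_or_ge k cs.length with hlt | hge
    · have hd : cs.drop k = cs[k] :: cs.drop (k + 1) :=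
        List.drop_eq_getElem_cons hlt
      rw [hd]
      simp only [getConsecLoopA]
      rw [ix_step cs k hlt]
      by_cases hlast : (k : Int) = (cs.length : Int) - 1
      · rw [if_pos hlast]
        have h2 : cs.drop (k + 1) = [] := List.drop_eq_nil_of_le (by omega)
        rw [h2]
        simp
      · rw [if_neg hlast]
        have hk1 : k + 1 < cs.length := by omega
        have hd1 : cs.drop (k + 1) = cs[k + 1] :: cs.drop (k + 2) :=
          List.drop_eq_getElem_cons hk1
        have hget : PySem.List.pyGetD cs ((k : Int) + 1) ' ' = cs[k + 1] := by
          have he : ((k : Int) + 1) = ((k + 1 : Nat) : Int) := by push_cast; ring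
          rw [he, PySem.List.pyGetD_natCast]
          simp [List.getD, hk1]
        rw [hget]
        have hrec := ih (k + 1)
          (if PySem.Chars.isdigit cs[k] && PySem.Chars.isdigit cs[k + 1] then num + 1 else num)
          (by omega) (by omega)
        push_cast at hrec
        rw [show (k : Int) + 1 - 1 = (k : Int) from by ring] at hrec
        rw [hrec, hd1, List.zip_cons_cons, List.countP_cons]
        simp only [pairP]
        by_cases hp : (PySem.Chars.isdigit cs[k] && PySem.Chars.isdigit cs[k + 1]) = true <;>
          simp [hp] <;> push_cast <;> ring
    · have h1 : cs.drop k = [] := List.drop_eq_nil_of_le (by omega)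
      have h2 : cs.drop (k + 1) = [] := List.drop_eq_nil_of_le (by omega)
      rw [h1, h2]
      simp [getConsecLoopA]

-- ===== VERDICT (by name: the statement is the Claim_ definition above) =====
theorem get_consecutive_numbers_spec : Claim_equal_get_consecutive_numbers := by
  intro x _
  unfold Spec_get_consecutive_numbers get_consecutive_numbers get_consecutive_numbers_alt
  have h := loop_inv x.toList x.toList.length 0 0 (by omega) (by omega)
  simp only [List.drop_zero, Nat.cast_zero, zero_sub, zero_add] at h
  rw [h, List.drop_one]
  rfl
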